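-- pv_equiv track=rewrite | github.com/KrzysztoPy/WordsLearningProgram | LOGIC/Logic.py | check_have_txt
-- ===== SOURCE A (Python) =====
-- def check_have_txt(file_name):
--     tmp_path = ""
--     file_name = file_name[::-1]
--     if len(file_name) > 4:
--         for i in range(0, 5):
--             tmp_path += file_name[i]
--         file_name = file_name[::-1]
--         if tmp_path == ".txt":
--             return file_name
--         else:
--             return file_name + ".txt"
--     else:
--         file_name = file_name[::-1]
--         return file_name + ".txt"
-- ===== SOURCE B (Python) =====
-- def check_have_txt(file_name):
--     # A's suffix check compares 5 reversed chars to ".txt" (4 chars), so it is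
--     # never true: A unconditionally appends ".txt". B is the closed form.
--     return file_name + ".txt"
-- ===== Notes on version B (the rewrite author's own statement) =====
-- stated objective: simpler
-- what changed: Replaced the reverse-string, 5-char loop and dead suffix comparison (which can never equal the 4-char '.txt') with the unconditional closed form file_name + '.txt'.
import Mathlib
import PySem

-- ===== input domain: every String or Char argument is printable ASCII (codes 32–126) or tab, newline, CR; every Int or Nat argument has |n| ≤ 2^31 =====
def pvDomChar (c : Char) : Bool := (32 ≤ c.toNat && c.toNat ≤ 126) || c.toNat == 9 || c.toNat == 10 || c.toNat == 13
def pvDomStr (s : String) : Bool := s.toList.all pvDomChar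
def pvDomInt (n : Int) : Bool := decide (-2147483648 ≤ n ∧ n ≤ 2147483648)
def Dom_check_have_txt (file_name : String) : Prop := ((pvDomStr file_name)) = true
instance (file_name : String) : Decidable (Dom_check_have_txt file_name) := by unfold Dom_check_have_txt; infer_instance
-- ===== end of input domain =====

-- B replaces A's reverse/loop/dead suffix-comparison with the closed form file_name + ".txt" (simpler; same behaviour, since A's 5-char tmp can never equal ".txt").


-- ===== PORT A =====
def check_have_txt (file_name : String) : String :=
  -- tmp_path = ""; file_name = file_name[::-1]
  let fn := (PySem.Str.slice? file_name none none (-1)).getD file_name  -- step -1 slice is always some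
  if 4 < PySem.Str.len fn then
    -- for i in range(0, 5): tmp_path += file_name[i]   (indices are in range since len > 4)
    let tmp_path : List Char :=
      (PySem.List.pyRange 0 5 1).foldl
        (fun acc i => acc ++ ((PySem.Str.pyGet? fn i).map (fun c => [c])).getD []) []
    let fn2 := (PySem.Str.slice? fn none none (-1)).getD fn  -- file_name = file_name[::-1]
    if String.ofList tmp_path = ".txt" then fn2
    else String.ofList (fn2.toList ++ ".txt".toList)
  else
    let fn2 := (PySem.Str.slice? fn none none (-1)).getD fn
    String.ofList (fn2.toList ++ ".txt".toList)

-- ===== PORT B =====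
def check_have_txt_alt (file_name : String) : String :=
  String.ofList (file_name.toList ++ ".txt".toList)

-- ===== PRECONDITION & SPEC =====
def Spec_check_have_txt (file_name : String) (out : String) : Prop := out = check_have_txt_alt file_name
instance (file_name : String) (out : String) : Decidable (Spec_check_have_txt file_name out) := by unfold Spec_check_have_txt; infer_instance

-- ===== CLAIM (what is proved, stated in full; the proofs are below) =====
def Claim_equal_check_have_txt : Prop := ∀ (file_name : String), Dom_check_have_txt file_name → Spec_check_have_txt file_name (check_have_txt file_name)

-- ===== LEMMAS AND PROOFS =====

lemma pyGet_some (fn : String) (i : Int) (h0 : 0 ≤ i) (h1 : i < fn.toList.length) :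
    ∃ c, PySem.Str.pyGet? fn i = some c := by
  obtain ⟨n, rfl⟩ := Int.eq_ofNat_of_zero_le h0
  rw [PySem.Str.pyGet?_natCast]
  exact ⟨_, List.getElem?_eq_getElem (by exact_mod_cast h1)⟩

-- The 5-iteration loop over a string of length > 4 builds a 5-char list, never equal to ".txt".
lemma tmp_path_ne (fn : String) (h : 4 < PySem.Str.len fn) :
    String.ofList ((PySem.List.pyRange 0 5 1).foldl
      (fun acc i => acc ++ ((PySem.Str.pyGet? fn i).map (fun c => [c])).getD []) []) ≠ ".txt" := by
  have hlen : 4 < fn.toList.length := by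
    have := PySem.Str.len_eq fn
    omega
  obtain ⟨c0, h0⟩ := pyGet_some fn 0 (by omega) (by omega)
  obtain ⟨c1, h1⟩ := pyGet_some fn 1 (by omega) (by omega)
  obtain ⟨c2, h2⟩ := pyGet_some fn 2 (by omega) (by omega)
  obtain ⟨c3, h3⟩ := pyGet_some fn 3 (by omega) (by omega)
  obtain ⟨c4, h4⟩ := pyGet_some fn 4 (by omega) (by omega)
  intro hEq
  have hr : PySem.List.pyRange 0 5 1 = [0, 1, 2, 3, 4] := by decide
  rw [hr] at hEq
  simp only [List.foldl, h0, h1, h2, h3, h4, Option.map_some, Option.getD_some,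
    List.nil_append, List.append_assoc, List.singleton_append] at hEq
  have htl := congrArg String.toList hEq
  have hdot : (".txt" : String).toList = ['.', 't', 'x', 't'] := by decide
  rw [hdot] at htl
  simp at htl
-- ===== VERDICT (by name: the statement is the Claim_ definition above) =====
theorem check_have_txt_spec : Claim_equal_check_have_txt := by
  intro s _
  show check_have_txt s = check_have_txt_alt s
  unfold check_have_txt check_have_txt_alt
  rw [PySem.Str.slice?_none_none_neg_one]
  simp only [Option.getD_some]
  rw [PySem.Str.slice?_none_none_neg_one]
  by_cases h : 4 < PySem.Str.len (String.ofList s.toList.reverse)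
  · rw [if_pos h, if_neg (tmp_path_ne _ h)]
    simp
  · rw [if_neg h]
    simp
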